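-- pv_equiv track=rewrite | github.com/jameshowison/delft | delft/textClassification/preprocess.py | get_segments
-- ===== SOURCE A (Python) =====
-- def get_segments(tokens, maxlen):
--     """
--     Segments: 0 for the first sequence, 1 for the second
--     """
--     segments = []
--     current_segment_id = 0
--     for token in tokens:
--         segments.append(current_segment_id)
--         if token == "[SEP]":
--             current_segment_id = 1
--     return segments + [0] * (maxlen - len(tokens))
-- ===== SOURCE B (Python) =====
-- def get_segments(tokens, maxlen):
--     """
--     Segments: 0 for the first sequence, 1 for the second
--     """
--     if "[SEP]" in tokens:
--         j = tokens.index("[SEP]")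
--         segments = [0] * (j + 1) + [1] * (len(tokens) - j - 1)
--     else:
--         segments = [0] * len(tokens)
--     return segments + [0] * (maxlen - len(tokens))
-- ===== Notes on version B (the rewrite author's own statement) =====
-- stated objective: simpler
-- what changed: B locates the first '[SEP]' once and builds the segment list by block construction ([0]*(j+1) + [1]*(rest)) instead of A's per-token accumulate-and-flip loop.
import Mathlib
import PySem

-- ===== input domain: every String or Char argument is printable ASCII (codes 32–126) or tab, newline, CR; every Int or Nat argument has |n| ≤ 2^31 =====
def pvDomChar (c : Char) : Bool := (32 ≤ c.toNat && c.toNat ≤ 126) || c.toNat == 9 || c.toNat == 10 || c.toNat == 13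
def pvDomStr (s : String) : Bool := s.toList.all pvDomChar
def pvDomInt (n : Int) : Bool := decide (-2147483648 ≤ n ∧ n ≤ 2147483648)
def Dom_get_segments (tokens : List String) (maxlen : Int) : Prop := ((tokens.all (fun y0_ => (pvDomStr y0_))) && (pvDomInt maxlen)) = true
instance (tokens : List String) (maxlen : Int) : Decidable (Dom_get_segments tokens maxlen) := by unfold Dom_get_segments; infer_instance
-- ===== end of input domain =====

-- B builds the segment list by block construction from the first '[SEP]' index instead of A's
-- per-token accumulate-and-flip loop (objective: simpler).

-- ===== PORT A =====
-- segments = []; current_segment_id = 0; for token in tokens: append id; flip on "[SEP]"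
def get_segments (tokens : List String) (maxlen : Int) : List Int :=
  let st := tokens.foldl
    (fun (st : List Int × Int) token =>
      (st.1 ++ [st.2], if token == "[SEP]" then 1 else st.2))
    ([], 0)
  st.1 ++ List.replicate (maxlen - tokens.length).toNat 0

-- ===== PORT B =====
def get_segments_alt (tokens : List String) (maxlen : Int) : List Int :=
  let segments :=
    if tokens.contains "[SEP]" then
      let j := tokens.idxOf "[SEP]"
      List.replicate (j + 1) 0 ++ List.replicate (tokens.length - j - 1) 1
    else
      List.replicate tokens.length 0
  segments ++ List.replicate (maxlen - tokens.length).toNat 0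

-- ===== PRECONDITION & SPEC =====
def Spec_get_segments (tokens : List String) (maxlen : Int) (out : List Int) : Prop := out = get_segments_alt tokens maxlen
instance (tokens : List String) (maxlen : Int) (out : List Int) : Decidable (Spec_get_segments tokens maxlen out) := by unfold Spec_get_segments; infer_instance

-- ===== CLAIM (what is proved, stated in full; the proofs are below) =====
def Claim_equal_get_segments : Prop := ∀ (tokens : List String) (maxlen : Int), Dom_get_segments tokens maxlen → Spec_get_segments tokens maxlen (get_segments tokens maxlen)

-- ===== LEMMAS AND PROOFS =====

-- the loop body of A, isolated as structural recursion (cur = current_segment_id)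
def segA : List String → Int → List Int
  | [], _ => []
  | t :: ts, cur => cur :: segA ts (if t == "[SEP]" then 1 else cur)

theorem foldl_segA (ts : List String) (acc : List Int) (cur : Int) :
    (ts.foldl (fun (st : List Int × Int) token =>
      (st.1 ++ [st.2], if token == "[SEP]" then 1 else st.2)) (acc, cur)).1
    = acc ++ segA ts cur := by
  induction ts generalizing acc cur with
  | nil => simp [segA]
  | cons t ts ih =>
    simp only [List.foldl_cons, segA]
    rw [ih]
    simp

theorem segA_one (ts : List String) : segA ts 1 = List.replicate ts.length 1 := by
  induction ts with
  | nil => simp [segA]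
  | cons t ts ih =>
    simp [segA, List.replicate_succ, ih]

theorem segA_zero (ts : List String) :
    segA ts 0 =
      if ts.contains "[SEP]" then
        List.replicate (ts.idxOf "[SEP]" + 1) 0
          ++ List.replicate (ts.length - ts.idxOf "[SEP]" - 1) 1
      else List.replicate ts.length 0 := by
  induction ts with
  | nil => simp [segA]
  | cons t ts ih =>
    by_cases h : t = "[SEP]"
    · subst h
      simp [segA, segA_one, List.replicate_succ]
    · have hbe : (t == "[SEP]") = false := by simp [h]
      have hne : ¬ "[SEP]" = t := fun hh => h hh.symm
      by_cases hm : "[SEP]" ∈ ts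
      · simp [segA, hbe, ih, hm, hne, List.idxOf_cons, List.replicate_succ]
      · simp [segA, hbe, ih, hm, hne, List.replicate_succ]

-- ===== VERDICT (by name: the statement is the Claim_ definition above) =====
theorem get_segments_spec : Claim_equal_get_segments := by
  intro tokens maxlen _
  unfold Spec_get_segments get_segments get_segments_alt
  simp only [foldl_segA, List.nil_append, segA_zero]
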